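-- pv_equiv track=rewrite | github.com/yso8296/Algorithm | Algorithm/프로그래머스/level 1/[1차] 비밀지도.py | solution
-- ===== SOURCE A (Python) =====
-- def deximal(arr, n):
--     result = []
--     for i in range(n):
--         dex = ''
--         num = arr[i]
--         while num != 0:
--             dex += str(num % 2)
--             num //= 2
--         for i in range(len(dex), n):
--             dex += '0'
--         dex = ''.join(reversed(list(dex)))
--         result.append(dex)
--     return result
--
-- def solution(n, arr1, arr2):
--     result = []
--     arr1 = deximal(arr1, n)
--     arr2 = deximal(arr2, n)
--     for i in range(n):
--         word = ''
--         for j in range(n):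
--             if arr1[i][j] == '1' or arr2[i][j] == '1':
--                 word += '#'
--             else:
--                 word += ' '
--         result.append(word)
--     return result
-- ===== SOURCE B (Python) =====
-- def solution(n, arr1, arr2):
--     return [''.join('#' if c == '1' else ' ' for c in format(arr1[i] | arr2[i], 'b')).rjust(n)
--             for i in range(n)]
-- ===== Notes on version B (the rewrite author's own statement) =====
-- stated objective: simpler
-- what changed: B replaces A's two manual per-number binary-conversion passes (LSB string building, padding, reversal) and the nested character-by-character OR loop with one integer OR per row rendered once via format(...,'b') and rjust. Pre_ excludes inputs with an entry >= 2^n among the first n (outside the puzzle's n-by-n domain, where A's fixed n-wide inner loop keeps only each number's top n bits while B renders the full-width row -- both unspecified corners), besides inputs where A raises or diverges.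
-- outside the precondition, e.g. on solution(1, [2], [0]): A returns ['#'], B returns ['# ']; on solution(2, [4, 0], [1, 0]): A returns ['##', '  '], B returns ['# #', '  ']
import Mathlib
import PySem

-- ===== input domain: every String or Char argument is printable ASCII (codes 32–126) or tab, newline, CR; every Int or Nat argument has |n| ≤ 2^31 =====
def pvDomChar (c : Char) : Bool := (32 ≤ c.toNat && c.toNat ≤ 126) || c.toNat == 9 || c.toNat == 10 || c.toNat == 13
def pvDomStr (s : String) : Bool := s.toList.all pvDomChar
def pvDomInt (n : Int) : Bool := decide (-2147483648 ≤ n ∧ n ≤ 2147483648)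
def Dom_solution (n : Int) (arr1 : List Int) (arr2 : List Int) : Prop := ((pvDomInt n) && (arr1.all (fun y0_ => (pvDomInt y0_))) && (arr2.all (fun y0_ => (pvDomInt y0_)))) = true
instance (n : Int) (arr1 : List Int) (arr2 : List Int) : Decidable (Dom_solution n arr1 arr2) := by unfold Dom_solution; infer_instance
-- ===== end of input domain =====

-- B replaces A's two hand-rolled binary-conversion passes and the nested character-by-character
-- OR with one integer OR per row rendered once (format + rjust); same cost, simpler.

-- ===== PORT A =====
-- the 'while num != 0' loop of deximal, building dex LSB-first; Python diverges for num < 0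
-- (excluded by Pre_solution), the port stops there
def pyBitsAux : Nat → Int → List Char
  | 0, _ => []
  | (f+1), num =>
    if num ≤ 0 then []
    else PySem.Int.toChars (PySem.Int.mod num 2) ++ pyBitsAux f (PySem.Int.floordiv num 2)

-- fuel num.toNat is enough: num is halved each iteration, so the loop runs ≤ num.toNat times
def pyBits (num : Int) : List Char := pyBitsAux num.toNat num

def deximalPort (arr : List Int) (n : Int) : List String :=
  (PySem.List.pyRange 0 n 1).foldl (fun result i =>
    result ++ [String.ofList
      (((PySem.List.pyRange ((pyBits (PySem.List.pyGetD arr i 0)).length : Int) n 1).foldl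
          (fun d _ => d ++ ['0'])                             -- the '0'-padding for-loop
          (pyBits (PySem.List.pyGetD arr i 0))).reverse)])    -- ''.join(reversed(list(dex)))
    []                                                        -- arr[i] as pyGetD: in range under Pre_solution

def solution (n : Int) (arr1 : List Int) (arr2 : List Int) : List String :=
  let a1 := deximalPort arr1 n
  let a2 := deximalPort arr2 n
  (PySem.List.pyRange 0 n 1).foldl (fun result i =>
    result ++ [String.ofList
      ((PySem.List.pyRange 0 n 1).foldl (fun word j =>
        if (PySem.List.pyGetD (PySem.List.pyGetD a1 i "").toList j ' ') = '1'
           ∨ (PySem.List.pyGetD (PySem.List.pyGetD a2 i "").toList j ' ') = '1'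
        then word ++ ['#'] else word ++ [' ']) [])])          -- string indexing a1[i][j]: in range under Pre_solution
    []

-- ===== PORT B =====
def solution_alt (n : Int) (arr1 : List Int) (arr2 : List Int) : List String :=
  (PySem.List.pyRange 0 n 1).map (fun i =>
    String.ofList
      (List.replicate (n.toNat - ((PySem.Int.toBinChars
          (PySem.Int.bor (PySem.List.pyGetD arr1 i 0) (PySem.List.pyGetD arr2 i 0))).map
          (fun c => if c = '1' then '#' else ' ')).length) ' '    -- .rjust(n): left-pad with spaces to width n
       ++ (PySem.Int.toBinChars
          (PySem.Int.bor (PySem.List.pyGetD arr1 i 0) (PySem.List.pyGetD arr2 i 0))).map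
          (fun c => if c = '1' then '#' else ' ')))

-- ===== PRECONDITION & SPEC =====
-- Pre_ excludes inputs where A does not return normally — n > len(arr1) or n > len(arr2) raises
-- IndexError and a negative entry among the first n makes A's while-loop diverge — and inputs with
-- an entry ≥ 2^n among the first n: those lie outside the puzzle's n×n domain, and there A's fixed
-- n-wide inner loop keeps only each number's top n bits while B renders the full-width merged row,
-- two equally unspecified corner renderings.
def Pre_solution (n : Int) (arr1 : List Int) (arr2 : List Int) : Prop :=
  n ≤ (arr1.length : Int) ∧ n ≤ (arr2.length : Int) ∧
  (∀ x ∈ arr1.take n.toNat, 0 ≤ x ∧ x < (2:Int) ^ n.toNat) ∧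
  (∀ x ∈ arr2.take n.toNat, 0 ≤ x ∧ x < (2:Int) ^ n.toNat)
instance (n : Int) (arr1 : List Int) (arr2 : List Int) : Decidable (Pre_solution n arr1 arr2) := by unfold Pre_solution; infer_instance
def pvWitness_solution : Int × List Int × List Int := (2, [1, 2], [2, 0])

def Spec_solution (n : Int) (arr1 : List Int) (arr2 : List Int) (out : List String) : Prop := out = solution_alt n arr1 arr2
instance (n : Int) (arr1 : List Int) (arr2 : List Int) (out : List String) : Decidable (Spec_solution n arr1 arr2 out) := by unfold Spec_solution; infer_instance

-- ===== CLAIM (what is proved, stated in full; the proofs are below) =====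
def Claim_equal_solution : Prop := ∀ (n : Int) (arr1 : List Int) (arr2 : List Int), Dom_solution n arr1 arr2 → Pre_solution n arr1 arr2 → Spec_solution n arr1 arr2 (solution n arr1 arr2)

-- ===== LEMMAS AND PROOFS =====

-- the LSB-first binary digit characters of a natural number
def myBits : Nat → List Char
  | 0 => []
  | (m+1) => Nat.digitChar ((m+1) % 2) :: myBits ((m+1)/2)
decreasing_by omega

lemma myBits_pos {x : Nat} (h : 0 < x) :
    myBits x = Nat.digitChar (x % 2) :: myBits (x / 2) := by
  cases x with
  | zero => omega
  | succ m => rw [myBits]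

lemma pyBitsAux_natCast : ∀ (f m : Nat), m ≤ f → pyBitsAux f (m : Int) = myBits m := by
  intro f
  induction f with
  | zero => intro m hm; interval_cases m; simp [pyBitsAux, myBits]
  | succ f ih =>
    intro m hm
    cases m with
    | zero => simp [pyBitsAux, myBits]
    | succ k =>
      rw [pyBitsAux]
      have h2 : PySem.Int.mod ((k+1 : Nat) : Int) 2 = (((k+1) % 2 : Nat) : Int) := by
        exact_mod_cast PySem.Int.mod_natCast (k+1) 2
      have h3 : PySem.Int.floordiv ((k+1 : Nat) : Int) 2 = (((k+1) / 2 : Nat) : Int) := by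
        exact_mod_cast PySem.Int.floordiv_natCast (k+1) 2
      rw [if_neg (by simp), h2, h3, ih ((k+1)/2) (by omega), myBits_pos (Nat.succ_pos k)]
      rcases Nat.mod_two_eq_zero_or_one (k+1) with h | h <;> rw [h] <;> rfl

lemma pyBits_natCast (m : Nat) : pyBits (m : Int) = myBits m := by
  rw [pyBits, Int.toNat_natCast]
  exact pyBitsAux_natCast m m le_rfl

lemma bits_pad : ∀ (L x : Nat), x < 2 ^ L →
    myBits x ++ List.replicate (L - (myBits x).length) '0'
      = (List.range L).map (fun k => if x.testBit k then '1' else '0') := by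
  intro L
  induction L with
  | zero => intro x hx; interval_cases x; simp [myBits]
  | succ L ih =>
    intro x hx
    cases Nat.eq_zero_or_pos x with
    | inl h0 =>
      subst h0
      rw [show (fun k => if (0:Nat).testBit k then '1' else '0') = (fun (_ : Nat) => '0') by
        funext k; simp [Nat.zero_testBit]]
      simp [myBits, List.map_const']
    | inr hpos =>
      rw [myBits_pos hpos, List.range_succ_eq_map, List.map_cons, List.map_map]
      have hlen : List.replicate (L + 1 - (Nat.digitChar (x % 2) :: myBits (x / 2)).length) '0'
          = List.replicate (L - (myBits (x / 2)).length) '0' := by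
        simp [List.length_cons]
      rw [hlen, List.cons_append]
      have hhead : Nat.digitChar (x % 2) = if x.testBit 0 then '1' else '0' := by
        rw [Nat.testBit_zero]
        rcases Nat.mod_two_eq_zero_or_one x with h | h <;> rw [h] <;> decide
      have htail : myBits (x / 2) ++ List.replicate (L - (myBits (x / 2)).length) '0'
          = (List.range L).map (fun k => if (x / 2).testBit k then '1' else '0') := by
        apply ih
        have : 2 ^ (L + 1) = 2 ^ L * 2 := by rw [Nat.pow_succ]
        omega
      rw [hhead, htail]
      congr 1
      apply List.map_congr_left
      intro k _
      simp [Nat.succ_eq_add_one, Nat.testBit_add_one]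

lemma toDigitsCore_eq : ∀ (f x : Nat) (ds : List Char), 0 < x → x < f →
    Nat.toDigitsCore 2 f x ds = (myBits x).reverse ++ ds := by
  intro f
  induction f with
  | zero => intro x ds hx hf; omega
  | succ f ih =>
    intro x ds hx hf
    rw [Nat.toDigitsCore]
    by_cases h0 : x / 2 = 0
    · have hx1 : x = 1 := by omega
      subst hx1
      simp [h0, myBits_pos (by omega : (0:Nat) < 1), myBits]
    · rw [if_neg h0, ih (x / 2) _ (by omega) (by omega), myBits_pos hx]
      simp

lemma toDigits_two_eq {x : Nat} (hx : 0 < x) : Nat.toDigits 2 x = (myBits x).reverse := by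
  rw [Nat.toDigits, toDigitsCore_eq (x + 1) x [] hx (by omega)]
  simp

lemma reverse_map_range (n : Nat) (f : Nat → Char) :
    ((List.range n).map f).reverse = (List.range n).map (fun k => f (n - 1 - k)) := by
  apply List.ext_getElem
  · simp
  · intro i h1 h2
    simp only [List.getElem_reverse, List.getElem_map, List.getElem_range,
      List.length_map, List.length_range] at *

-- the row of n characters whose k-th entry renders bit (n-1-k) of x
def bitRow (n x : Nat) (one zero : Char) : List Char :=
  (List.range n).map (fun k => if x.testBit (n - 1 - k) then one else zero)

lemma A_row {n x : Nat} (hx : x < 2 ^ n) :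
    (myBits x ++ List.replicate (n - (myBits x).length) '0').reverse = bitRow n x '1' '0' := by
  rw [bits_pad n x hx, reverse_map_range]
  rfl

lemma B_row {n m : Nat} (hn : 0 < n) (hm : m < 2 ^ n) :
    List.replicate (n - ((Nat.toDigits 2 m).map (fun c => if c = '1' then '#' else ' ')).length) ' '
      ++ (Nat.toDigits 2 m).map (fun c => if c = '1' then '#' else ' ')
      = bitRow n m '#' ' ' := by
  cases Nat.eq_zero_or_pos m with
  | inl h0 =>
    subst h0
    have ht : Nat.toDigits 2 0 = ['0'] := by decide
    rw [ht]
    obtain ⟨k, rfl⟩ : ∃ k, n = k + 1 := ⟨n - 1, by omega⟩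
    rw [show (List.replicate ((k+1) - ((['0'].map (fun c => if c = '1' then '#' else ' ')).length)) ' ') = List.replicate k ' ' by simp]
    rw [show ((['0']).map (fun c => if c = '1' then '#' else ' ')) = [' '] by rfl]
    rw [bitRow, show (fun j => if (0:Nat).testBit ((k+1) - 1 - j) then '#' else ' ') = (fun (_ : Nat) => ' ') by
      funext j; simp [Nat.zero_testBit]]
    rw [List.map_const', List.length_range, List.replicate_succ']
  | inr hpos =>
    rw [toDigits_two_eq hpos, List.map_reverse]
    have base := congrArg (fun l => (l.map (fun c => if c = '1' then '#' else ' ')).reverse) (bits_pad n m hm)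
    simp only [List.map_append, List.map_replicate, List.reverse_append,
      List.reverse_replicate] at base
    rw [show ((if ('0':Char) = '1' then '#' else ' ')) = ' ' by rfl] at base
    have hlen : ((myBits m).map (fun c => if c = '1' then '#' else ' ')).reverse.length = (myBits m).length := by simp
    rw [show (n - ((myBits m).map (fun c => if c = '1' then '#' else ' ')).reverse.length) = n - (myBits m).length by rw [hlen]]
    rw [base, List.map_map, reverse_map_range, bitRow]
    apply List.map_congr_left
    intro k _
    simp only [Function.comp]
    split <;> rfl

lemma bitRow_getD {n k : Nat} (x : Nat) (one zero d : Char) (hk : k < n) :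
    PySem.List.pyGetD (bitRow n x one zero) (k : Int) d = if x.testBit (n - 1 - k) then one else zero := by
  rw [PySem.List.pyGetD_natCast, bitRow, PySem.List.getD_map_range _ _ _ _ hk]

lemma pad_fold (n : Int) (d : List Char) :
    (PySem.List.pyRange (d.length : Int) n 1).foldl (fun d _ => d ++ ['0']) d
      = d ++ List.replicate (n.toNat - d.length) '0' := by
  rw [PySem.List.foldl_append_singleton_eq_map (fun _ => '0')]
  rw [List.map_const', PySem.List.length_pyRange_one]
  congr 2
  omega

lemma deximalPort_eq (arr : List Int) (n : Int) :
    deximalPort arr n = (PySem.List.pyRange 0 n 1).map (fun i =>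
      String.ofList ((pyBits (PySem.List.pyGetD arr i 0)
        ++ List.replicate (n.toNat - (pyBits (PySem.List.pyGetD arr i 0)).length) '0').reverse)) := by
  unfold deximalPort
  rw [PySem.List.foldl_append_singleton_eq_map, List.nil_append]
  apply List.map_congr_left
  intro i _
  rw [pad_fold]

lemma word_eq (n : Int) (x y : Nat) :
    (PySem.List.pyRange 0 n 1).map (fun j =>
        if (PySem.List.pyGetD (bitRow n.toNat x '1' '0') j ' ') = '1'
           ∨ (PySem.List.pyGetD (bitRow n.toNat y '1' '0') j ' ') = '1'
        then '#' else ' ')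
      = bitRow n.toNat (x ||| y) '#' ' ' := by
  rw [PySem.List.pyRange_one, Int.sub_zero, List.map_map]
  conv_rhs => rw [bitRow]
  apply List.map_congr_left
  intro k hk
  have hk' : k < n.toNat := by
    rw [List.mem_range] at hk; omega
  simp only [Function.comp, zero_add]
  rw [bitRow_getD x '1' '0' ' ' hk', bitRow_getD y '1' '0' ' ' hk', Nat.testBit_lor]
  rcases hbx : x.testBit (n.toNat - 1 - k) <;> rcases hby : y.testBit (n.toNat - 1 - k) <;> simp

-- the i-th entry read by the loops is among the first n elements
lemma entry_mem {n i : Int} {arr : List Int}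
    (hlen : n ≤ (arr.length : Int)) (hi0 : 0 ≤ i) (hin : i < n) :
    PySem.List.pyGetD arr i 0 ∈ arr.take n.toNat := by
  have hilt : i < (arr.length : Int) := lt_of_lt_of_le hin hlen
  rw [PySem.List.pyGetD_eq_getElem arr 0 hi0 hilt]
  have hlt : i.toNat < (arr.take n.toNat).length := by
    simp [List.length_take]; omega
  have : (arr.take n.toNat)[i.toNat] = arr[i.toNat] := List.getElem_take
  rw [← this]
  exact List.getElem_mem hlt

-- facts about the i-th entries under Pre_
lemma entry_facts {n i : Int} {arr : List Int}
    (hlen : n ≤ (arr.length : Int))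
    (hpre : ∀ x ∈ arr.take n.toNat, 0 ≤ x ∧ x < (2:Int) ^ n.toNat)
    (hi0 : 0 ≤ i) (hin : i < n) :
    0 ≤ PySem.List.pyGetD arr i 0 ∧
    (PySem.List.pyGetD arr i 0).toNat < 2 ^ n.toNat ∧
    PySem.List.pyGetD arr i 0 = ((PySem.List.pyGetD arr i 0).toNat : Int) := by
  have hmem := entry_mem hlen hi0 hin
  obtain ⟨h0, h1⟩ := hpre _ hmem
  refine ⟨h0, ?_, by omega⟩
  have : ((2:Int) ^ n.toNat) = ((2 ^ n.toNat : Nat) : Int) := by push_cast; ring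
  omega

lemma foldl_ite_append {α : Type} (P : α → Prop) [DecidablePred P] (l : List α) (acc : List Char) :
    l.foldl (fun w x => if P x then w ++ ['#'] else w ++ [' ']) acc
      = acc ++ l.map (fun x => if P x then '#' else ' ') := by
  rw [show (fun (w : List Char) x => if P x then w ++ ['#'] else w ++ [' '])
        = (fun w x => w ++ [if P x then '#' else ' ']) from by funext w x; split <;> rfl]
  exact PySem.List.foldl_append_singleton_eq_map _ _ _

lemma toBinChars_natCast (m : Nat) : PySem.Int.toBinChars ((m:Nat):Int) = Nat.toDigits 2 m := by
  simp [PySem.Int.toBinChars]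

-- ===== VERDICT (by name: the statement is the Claim_ definition above) =====
theorem solution_spec : Claim_equal_solution := by
  intro n arr1 arr2 _ hpre
  obtain ⟨hl1, hl2, hp1, hp2⟩ := hpre
  show solution n arr1 arr2 = solution_alt n arr1 arr2
  simp only [solution, solution_alt]
  rw [PySem.List.foldl_append_singleton_eq_map, List.nil_append]
  apply List.map_congr_left
  intro i hi
  rw [PySem.List.mem_pyRange_one] at hi
  obtain ⟨hi0, hin⟩ := hi
  obtain ⟨ha0, haB, haN⟩ := entry_facts hl1 hp1 hi0 hin
  obtain ⟨hb0, hbB, hbN⟩ := entry_facts hl2 hp2 hi0 hin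
  obtain ⟨ta, hta⟩ : ∃ t : Nat, PySem.List.pyGetD arr1 i 0 = (t : Int) :=
    ⟨(PySem.List.pyGetD arr1 i 0).toNat, haN⟩
  obtain ⟨tb, htb⟩ : ∃ t : Nat, PySem.List.pyGetD arr2 i 0 = (t : Int) :=
    ⟨(PySem.List.pyGetD arr2 i 0).toNat, hbN⟩
  rw [hta] at haB
  rw [htb] at hbB
  rw [Int.toNat_natCast] at haB hbB
  simp only [deximalPort_eq arr1 n, deximalPort_eq arr2 n,
    PySem.List.pyGetD_map_pyRange_of_nonneg _ n i _ hi0 hin, String.toList_ofList,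
    hta, htb, pyBits_natCast, A_row haB, A_row hbB]
  rw [foldl_ite_append, List.nil_append, word_eq]
  simp only [PySem.Int.bor_natCast, toBinChars_natCast]
  rw [B_row (by omega) (Nat.or_lt_two_pow haB hbB)]
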